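-- pv_equiv track=rewrite | github.com/blzzua/codewars | 7-kyu/simple_fun_334_two_beggars_and_gold.py | distribution_of
-- ===== SOURCE A (Python) =====
-- def distribution_of(golds):
--     n = len(golds)
--     res = [0, 0]
--     turn = 0
--     while len(golds) > 0:
--         a, b = golds[0], golds[-1]
--         res[turn] += golds.pop(0 if a >= b else -1)
--         turn = 1 - turn
--     return res
-- ===== SOURCE B (Python) =====
-- def distribution_of(golds):
--     res = [0, 0]
--     i, j = 0, len(golds) - 1
--     turn = 0
--     while i <= j:
--         if golds[i] >= golds[j]:
--             res[turn] += golds[i]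
--             i += 1
--         else:
--             res[turn] += golds[j]
--             j -= 1
--         turn = 1 - turn
--     return res
-- ===== Notes on version B (the rewrite author's own statement) =====
-- stated objective: faster
-- what changed: Replaces the destructive loop that repeatedly pops index 0 (an O(n) shift each time) with a non-mutating two-pointer scan over indices in one pass; intended as faster (a timing run measured ~1.4-1.5x at the largest size).
import Mathlib
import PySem

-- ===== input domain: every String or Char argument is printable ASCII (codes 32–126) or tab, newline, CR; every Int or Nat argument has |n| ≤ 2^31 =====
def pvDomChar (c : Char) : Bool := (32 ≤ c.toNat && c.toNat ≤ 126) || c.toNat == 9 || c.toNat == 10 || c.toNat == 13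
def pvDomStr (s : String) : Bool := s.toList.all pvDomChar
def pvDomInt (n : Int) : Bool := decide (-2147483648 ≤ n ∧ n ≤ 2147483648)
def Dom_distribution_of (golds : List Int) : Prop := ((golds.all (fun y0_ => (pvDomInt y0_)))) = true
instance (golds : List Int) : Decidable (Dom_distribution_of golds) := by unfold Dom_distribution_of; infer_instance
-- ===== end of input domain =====

-- B replaces A's destructive repeated pop(0)/pop(-1) by a non-mutating two-pointer index
-- scan in one pass (intended as faster; a timing run measured ~1.4-1.5x); A empties its
-- argument list in place, B does not — the equivalence proved is about the RETURN value only.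


-- ===== PORT A =====
-- A's while loop: golds shrinks by one each iteration (pop(0) = tail, pop(-1) = dropLast);
-- res is the pair (res[0], res[1]), turn alternates 0/1.  The fuel argument (the initial
-- length, one unit per iteration) only makes the recursion structural; it never runs out.
def pvGoA : Nat → List Int → Int × Int → Nat → Int × Int
  | _, [], res, _ => res
  | 0, _ :: _, res, _ => res
  | f + 1, x :: xs, (r0, r1), turn =>
    let a := x
    let b := (x :: xs).getLast (by simp)
    if a ≥ b then
      pvGoA f xs (if turn = 0 then (r0 + a, r1) else (r0, r1 + a)) (1 - turn)
    else
      pvGoA f (x :: xs).dropLast (if turn = 0 then (r0 + b, r1) else (r0, r1 + b)) (1 - turn)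

def distribution_of (golds : List Int) : List Int :=
  let r := pvGoA golds.length golds (0, 0) 0
  [r.1, r.2]

-- ===== PORT B =====
-- B's while loop over Int indices i, j; golds[i]/golds[j] are accessed only with
-- 0 ≤ i ≤ j < len, where getD i.toNat is exact for Python indexing.  Fuel = initial
-- length bounds the iteration count (j+1-i ≤ len); it never runs out.
def pvGoB (golds : List Int) : Nat → Int → Int → Int × Int → Nat → Int × Int
  | 0, _, _, res, _ => res
  | f + 1, i, j, res, turn =>
    if i ≤ j then
      let gi := golds.getD i.toNat 0
      let gj := golds.getD j.toNat 0
      if gi ≥ gj then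
        pvGoB golds f (i + 1) j
          (if turn = 0 then (res.1 + gi, res.2) else (res.1, res.2 + gi)) (1 - turn)
      else
        pvGoB golds f i (j - 1)
          (if turn = 0 then (res.1 + gj, res.2) else (res.1, res.2 + gj)) (1 - turn)
    else res

def distribution_of_alt (golds : List Int) : List Int :=
  let r := pvGoB golds golds.length 0 ((golds.length : Int) - 1) (0, 0) 0
  [r.1, r.2]

-- ===== PRECONDITION & SPEC =====
def Spec_distribution_of (golds : List Int) (out : List Int) : Prop := out = distribution_of_alt golds
instance (golds : List Int) (out : List Int) : Decidable (Spec_distribution_of golds out) := by unfold Spec_distribution_of; infer_instance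

-- ===== CLAIM (what is proved, stated in full; the proofs are below) =====
def Claim_equal_distribution_of : Prop := ∀ (golds : List Int), Dom_distribution_of golds → Spec_distribution_of golds (distribution_of golds)

-- ===== LEMMAS AND PROOFS =====

-- When the window is already empty, B's loop returns res whatever the fuel.
theorem pvGoB_done (golds : List Int) (f : Nat) (i j : Int) (res : Int × Int) (turn : Nat)
    (h : ¬ i ≤ j) : pvGoB golds f i j res turn = res := by
  cases f with
  | zero => rfl
  | succ f => simp [pvGoB, h]

-- B's loop on index window [i, j] computes A's loop on the corresponding sublist,
-- given enough fuel on both sides.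
theorem pvGoB_eq_pvGoA (n : Nat) : ∀ (golds : List Int) (f i j : Nat) (res : Int × Int)
    (turn : Nat), i ≤ j → j < golds.length → j - i = n → j + 1 - i ≤ f →
    pvGoB golds f (i : Int) (j : Int) res turn
      = pvGoA f ((golds.drop i).take (j + 1 - i)) res turn := by
  induction n with
  | zero =>
    intro golds f i j res turn hij hj hn hf
    have hie : i = j := by omega
    subst hie
    obtain ⟨f, rfl⟩ : ∃ f', f = f' + 1 := ⟨f - 1, by omega⟩
    have hseg : (golds.drop i).take (i + 1 - i) = [golds[i]] := by
      rw [show i + 1 - i = 1 from by omega, List.drop_eq_getElem_cons hj]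
      rfl
    rw [hseg]
    rw [pvGoB]
    simp only [le_refl, if_true]
    have hget : golds.getD ((i : Int)).toNat 0 = golds[i] := by
      simp [List.getD, List.getElem?_eq_getElem hj]
    rw [hget]
    rw [pvGoB_done golds f _ _ _ _ (by omega)]
    rw [pvGoA]
    cases f <;> simp [pvGoA]
  | succ n ih =>
    intro golds f i j res turn hij hj hn hf
    obtain ⟨f, rfl⟩ : ∃ f', f = f' + 1 := ⟨f - 1, by omega⟩
    have hi : i < golds.length := by omega
    have hseg : (golds.drop i).take (j + 1 - i)
        = golds[i] :: ((golds.drop (i + 1)).take (j - i)) := by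
      rw [List.drop_eq_getElem_cons hi]
      have : j + 1 - i = (j - i) + 1 := by omega
      rw [this, List.take_succ_cons]
    have hgi : golds.getD ((i : Int)).toNat 0 = golds[i] := by
      simp [List.getD, List.getElem?_eq_getElem hi]
    have hgj : golds.getD ((j : Int)).toNat 0 = golds[j] := by
      simp [List.getD, List.getElem?_eq_getElem hj]
    have hne : (golds.drop i).take (j + 1 - i) ≠ [] := by rw [hseg]; simp
    have hlast : (golds[i] :: ((golds.drop (i + 1)).take (j - i))).getLast (by simp)
        = golds[j] := by
      have h2 : ((golds.drop i).take (j + 1 - i)).getLast hne = golds[j] := by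
        rw [List.getLast_eq_getElem, List.getElem_take, List.getElem_drop]
        congr 1
        simp
        omega
      rw [← h2]
      congr 1
      exact hseg.symm
    rw [hseg, pvGoB]
    have hij' : (i : Int) ≤ (j : Int) := by exact_mod_cast hij
    simp only [hij', if_true, hgi, hgj]
    rw [pvGoA]
    simp only [hlast]
    by_cases hc : golds[i] ≥ golds[j]
    · simp only [hc, if_true]
      have h1 : ((i : Int) + 1) = ((i + 1 : Nat) : Int) := by push_cast; ring
      rw [h1, ih golds f (i + 1) j _ _ (by omega) hj (by omega) (by omega),
        show j + 1 - (i + 1) = j - i from by omega]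
    · simp only [hc, if_false]
      have h1 : ((j : Int) - 1) = ((j - 1 : Nat) : Int) := by
        have : 1 ≤ j := by omega
        push_cast [this]; ring
      rw [h1, ih golds f i (j - 1) _ _ (by omega) (by omega) (by omega) (by omega)]
      have hdl : (golds[i] :: ((golds.drop (i + 1)).take (j - i))).dropLast
          = (golds.drop i).take ((j - 1) + 1 - i) := by
        rw [← hseg, List.dropLast_eq_take, List.take_take]
        congr 1
        simp only [List.length_take, List.length_drop]
        omega
      rw [hdl]

theorem goB_top (golds : List Int) :
    pvGoB golds golds.length 0 ((golds.length : Int) - 1) (0, 0) 0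
      = pvGoA golds.length golds (0, 0) 0 := by
  cases golds with
  | nil => rfl
  | cons x xs =>
    have hlen : 0 < (x :: xs).length := by simp
    have h1 : (((x :: xs).length : Int) - 1) = (((x :: xs).length - 1 : Nat) : Int) := by
      push_cast [hlen]; ring
    have h2 := pvGoB_eq_pvGoA ((x :: xs).length - 1) (x :: xs) (x :: xs).length 0
      ((x :: xs).length - 1) (0, 0) 0 (by omega) (by omega) rfl (by omega)
    rw [h1]
    simp only [Nat.cast_zero] at h2
    rw [h2]
    congr 1
    simp

-- ===== VERDICT (by name: the statement is the Claim_ definition above) =====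
theorem distribution_of_spec : Claim_equal_distribution_of := by
  intro golds _
  unfold Spec_distribution_of distribution_of distribution_of_alt
  rw [goB_top]
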